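-- pv_equiv track=rewrite | github.com/lccstc/SeeSee | wxbot/bookkeeping-platform/bookkeeping_core/template_engine.py | _fixture_common_row_value
-- ===== SOURCE A (Python) =====
-- from typing import Any
--
-- def _fixture_common_row_value(rows: list[dict[str, Any]], key: str) -> str:
--     values = {
--         str(item.get(key) or "").strip()
--         for item in rows
--         if str(item.get(key) or "").strip()
--     }
--     if len(values) != 1:
--         return ""
--     return next(iter(values))
-- ===== SOURCE B (Python) =====
-- def _fixture_common_row_value(rows, key):
--     common = None
--     for item in rows:
--         v = str(item.get(key) or "").strip()
--         if not v:
--             continue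
--         if common is None:
--             common = v
--         elif v != common:
--             return ""
--     return common if common is not None else ""
-- ===== Notes on version B (the rewrite author's own statement) =====
-- stated objective: simpler
-- what changed: Replaced the set comprehension plus len==1 check with a single-pass loop maintaining one candidate value that short-circuits with '' on the first disagreement.
import Mathlib
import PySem

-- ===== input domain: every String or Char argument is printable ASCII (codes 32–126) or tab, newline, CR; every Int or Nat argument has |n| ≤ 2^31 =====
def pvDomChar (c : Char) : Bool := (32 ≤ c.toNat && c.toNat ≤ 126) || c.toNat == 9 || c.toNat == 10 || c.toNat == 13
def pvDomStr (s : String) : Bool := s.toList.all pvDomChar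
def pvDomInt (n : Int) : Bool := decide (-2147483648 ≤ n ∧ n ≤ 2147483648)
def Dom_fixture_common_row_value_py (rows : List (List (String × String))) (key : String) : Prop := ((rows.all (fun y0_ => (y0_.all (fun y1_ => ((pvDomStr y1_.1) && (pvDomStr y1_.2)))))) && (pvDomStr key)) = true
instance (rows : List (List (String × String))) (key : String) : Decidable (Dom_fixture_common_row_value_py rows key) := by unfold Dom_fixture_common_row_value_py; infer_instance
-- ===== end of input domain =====

-- B replaces A's set comprehension + len==1 test by a single-pass candidate loop
-- that short-circuits on the first disagreement (objective: simpler).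

-- ===== PORT A =====
-- str(item.get(key) or "").strip()  (values are strings, so str(...) is identity; None and "" both become "")
def pvVal (item : List (String × String)) (key : String) : String :=
  PySem.Str.strip (((PySem.Dict.mk item).get? key).getD "")

-- the set comprehension: fold Set.add over rows, adding only non-empty stripped values
def pvValues (rows : List (List (String × String))) (key : String) : PySem.Set String :=
  rows.foldl (fun s item =>
    let v := pvVal item key
    if v ≠ "" then PySem.Set.add s v else s) PySem.Set.empty

def fixture_common_row_value_py (rows : List (List (String × String))) (key : String) : String :=
  let values := pvValues rows key
  if PySem.Set.len values ≠ 1 then ""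
  else values.headD ""   -- next(iter(values)) on a singleton set: its unique element

-- ===== PORT B =====
def pvGoB (key : String) (common : Option String) : List (List (String × String)) → String
  | [] => common.getD ""
  | item :: rest =>
    let v := pvVal item key
    if v = "" then pvGoB key common rest
    else match common with
      | none => pvGoB key (some v) rest
      | some c => if v ≠ c then "" else pvGoB key common rest

def fixture_common_row_value_py_alt (rows : List (List (String × String))) (key : String) : String :=
  pvGoB key none rows

-- ===== PRECONDITION & SPEC =====
def Spec_fixture_common_row_value_py (rows : List (List (String × String))) (key : String) (out : String) : Prop := out = fixture_common_row_value_py_alt rows key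
instance (rows : List (List (String × String))) (key : String) (out : String) : Decidable (Spec_fixture_common_row_value_py rows key out) := by unfold Spec_fixture_common_row_value_py; infer_instance

-- ===== CLAIM (what is proved, stated in full; the proofs are below) =====
def Claim_equal_fixture_common_row_value_py : Prop := ∀ (rows : List (List (String × String))) (key : String), Dom_fixture_common_row_value_py rows key → Spec_fixture_common_row_value_py rows key (fixture_common_row_value_py rows key)

-- ===== LEMMAS AND PROOFS =====

-- abbreviation for A's fold step
def pvStep (key : String) (s : PySem.Set String) (item : List (String × String)) : PySem.Set String :=
  let v := pvVal item key
  if v ≠ "" then PySem.Set.add s v else s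

theorem pvValues_eq_foldl (rows : List (List (String × String))) (key : String) :
    pvValues rows key = rows.foldl (pvStep key) PySem.Set.empty := rfl

-- A's finalize
def pvFin (s : PySem.Set String) : String :=
  if PySem.Set.len s ≠ 1 then "" else s.headD ""

theorem pvLen_step_ge (key : String) (s : PySem.Set String) (item : List (String × String)) :
    s.length ≤ (pvStep key s item).length := by
  unfold pvStep PySem.Set.add
  dsimp only
  split_ifs <;> simp

theorem pvFin_of_two_le (key : String) (rows : List (List (String × String)))
    (s : PySem.Set String) (h : 2 ≤ s.length) :
    pvFin (rows.foldl (pvStep key) s) = "" := by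
  induction rows generalizing s with
  | nil =>
    unfold pvFin PySem.Set.len
    simp only [List.foldl_nil]
    rw [if_pos]
    omega
  | cons item rest ih =>
    simp only [List.foldl_cons]
    exact ih _ (le_trans h (pvLen_step_ge key s item))

theorem pvMain (key : String) (rows : List (List (String × String)))
    (c : Option String) (s : PySem.Set String)
    (h : (c = none ∧ s = []) ∨ (∃ v, c = some v ∧ s = [v] ∧ v ≠ "")) :
    pvFin (rows.foldl (pvStep key) s) = pvGoB key c rows := by
  induction rows generalizing c s with
  | nil =>
    rcases h with ⟨hc, hs⟩ | ⟨v, hc, hs, hv⟩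
    · subst hc; subst hs; rfl
    · subst hc; subst hs; rfl
  | cons item rest ih =>
    simp only [List.foldl_cons]
    unfold pvGoB
    dsimp only
    by_cases hv : pvVal item key = ""
    · rw [if_pos hv]
      have hstep : pvStep key s item = s := by
        unfold pvStep; dsimp only; rw [if_neg]; simp [hv]
      rw [hstep]
      exact ih c s h
    · rw [if_neg hv]
      rcases h with ⟨hc, hs⟩ | ⟨w, hc, hs, hw⟩
      · subst hc; subst hs
        have hstep : pvStep key ([] : PySem.Set String) item = [pvVal item key] := by
          unfold pvStep PySem.Set.add; simp [hv, PySem.Set.contains]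
        rw [hstep]
        exact ih (some (pvVal item key)) _ (Or.inr ⟨_, rfl, rfl, hv⟩)
      · subst hc; subst hs
        by_cases heq : pvVal item key = w
        · have hstep : pvStep key [w] item = [w] := by
            unfold pvStep PySem.Set.add; simp [heq, PySem.Set.contains]
          rw [hstep]
          simp only [heq, ne_eq, not_true_eq_false, if_false]
          exact ih (some w) _ (Or.inr ⟨w, rfl, rfl, hw⟩)
        · have hstep : pvStep key [w] item = [w, pvVal item key] := by
            unfold pvStep PySem.Set.add
            simp [hv, PySem.Set.contains, heq]
          rw [hstep]
          simp only [ne_eq, heq, not_false_eq_true, if_true]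
          exact pvFin_of_two_le key rest [w, pvVal item key] (by simp)

-- ===== VERDICT (by name: the statement is the Claim_ definition above) =====
theorem fixture_common_row_value_py_spec : Claim_equal_fixture_common_row_value_py := by
  intro rows key _
  unfold Spec_fixture_common_row_value_py fixture_common_row_value_py fixture_common_row_value_py_alt
  rw [pvValues_eq_foldl]
  exact pvMain key rows none [] (Or.inl ⟨rfl, rfl⟩)
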